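-- pv_equiv track=rewrite | github.com/dcm9/Optimal-Poker | poker_habits.py | action_eval
-- ===== SOURCE A (Python) =====
-- def action_eval(action_list):
--     hyper_aggression = ['A']
--     aggression = ['b','r']
--     neutral = ['B']
--     averse = ['k','c']
--     hyper_averse = ['f','K','Q']
--     counter = 0
--
--     if action_list is None:
--         #preflop showdown
--         return None
--
--     try:
--         len(action_list)
--     except:
--         return None
--
--     if (len(action_list) == 1 and action_list[0] == '-'):
--         #no action
--         return None
--
--     for i in range(len(action_list)):
--         #everything else
--         if action_list[i] in hyper_aggression:
--             counter += 2
--         elif action_list[i] in aggression: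
--             counter += 1
--         elif action_list[i] in neutral:
--             counter += 0
--         elif action_list[i] in averse:
--             counter -= 1
--         elif action_list[i] in hyper_averse:
--             counter -= 2
--
--     return counter
-- ===== SOURCE B (Python) =====
-- from collections import Counter
--
-- def action_eval(action_list):
--     if action_list is None:
--         return None
--     try:
--         len(action_list)
--     except:
--         return None
--     if len(action_list) == 1 and action_list[0] == '-':
--         return None
--     cnt = Counter(action_list)
--     return (2 * cnt['A'] + cnt['b'] + cnt['r']
--             - cnt['k'] - cnt['c']
--             - 2 * (cnt['f'] + cnt['K'] + cnt['Q']))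
-- ===== Notes on version B (the rewrite author's own statement) =====
-- stated objective: idiomatic
-- what changed: Replaced the per-element if/elif classifying loop with a collections.Counter frequency table and a single weighted-sum expression over the category weights.
import Mathlib
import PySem

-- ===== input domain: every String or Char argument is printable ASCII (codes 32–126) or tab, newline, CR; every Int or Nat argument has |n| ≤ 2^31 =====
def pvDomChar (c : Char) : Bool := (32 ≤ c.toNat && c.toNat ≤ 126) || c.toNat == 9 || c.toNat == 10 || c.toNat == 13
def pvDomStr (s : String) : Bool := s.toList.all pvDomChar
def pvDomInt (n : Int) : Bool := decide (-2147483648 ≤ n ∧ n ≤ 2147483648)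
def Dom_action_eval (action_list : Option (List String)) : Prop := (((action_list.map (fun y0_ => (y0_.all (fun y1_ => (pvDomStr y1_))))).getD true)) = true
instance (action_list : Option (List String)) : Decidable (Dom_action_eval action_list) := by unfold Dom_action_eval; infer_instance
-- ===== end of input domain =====

-- B replaces A's per-element if/elif classifying loop by a Counter frequency table
-- and one weighted-sum expression over the category weights (idiomatic).


-- ===== PORT A =====
def action_eval (action_list : Option (List String)) : Option Int :=
  match action_list with
  | none => none
  | some xs =>
    -- 'try: len(action_list) except: return None' never fires for a list
    if xs.length = 1 ∧ PySem.List.pyGet? xs 0 = some "-" then none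
    else
      some (xs.foldl (fun counter a =>
        if ["A"].contains a then counter + 2
        else if ["b", "r"].contains a then counter + 1
        else if ["B"].contains a then counter + 0
        else if ["k", "c"].contains a then counter - 1
        else if ["f", "K", "Q"].contains a then counter - 2
        else counter) 0)

-- ===== PORT B =====
def action_eval_alt (action_list : Option (List String)) : Option Int :=
  match action_list with
  | none => none
  | some xs =>
    if xs.length = 1 ∧ PySem.List.pyGet? xs 0 = some "-" then none
    else
      let cnt := PySem.Dict.counter xs
      some (2 * cnt.getD "A" 0 + cnt.getD "b" 0 + cnt.getD "r" 0
            - cnt.getD "k" 0 - cnt.getD "c" 0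
            - 2 * (cnt.getD "f" 0 + cnt.getD "K" 0 + cnt.getD "Q" 0))

-- ===== PRECONDITION & SPEC =====
def Spec_action_eval (action_list : Option (List String)) (out : Option Int) : Prop := out = action_eval_alt action_list
instance (action_list : Option (List String)) (out : Option Int) : Decidable (Spec_action_eval action_list out) := by unfold Spec_action_eval; infer_instance

-- ===== CLAIM (what is proved, stated in full; the proofs are below) =====
def Claim_equal_action_eval : Prop := ∀ (action_list : Option (List String)), Dom_action_eval action_list → Spec_action_eval action_list (action_eval action_list)

-- ===== LEMMAS AND PROOFS =====

-- the weight A's if/elif chain assigns to one action string, written with atomic tests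
def pvWeight (x : String) : Int :=
  2 * (if x = "A" then (1:Int) else 0) + (if x = "b" then (1:Int) else 0) + (if x = "r" then (1:Int) else 0)
  - (if x = "k" then (1:Int) else 0) - (if x = "c" then (1:Int) else 0)
  - 2 * ((if x = "f" then (1:Int) else 0) + (if x = "K" then (1:Int) else 0) + (if x = "Q" then (1:Int) else 0))

set_option maxHeartbeats 1000000 in
theorem action_eval_step (x : String) (acc : Int) :
    (if ["A"].contains x then acc + 2
     else if ["b", "r"].contains x then acc + 1
     else if ["B"].contains x then acc + 0
     else if ["k", "c"].contains x then acc - 1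
     else if ["f", "K", "Q"].contains x then acc - 2
     else acc) = acc + pvWeight x := by
  unfold pvWeight
  simp only [List.contains_cons, List.contains_nil, Bool.or_false, beq_iff_eq]
  split_ifs <;> subst_vars <;> simp_all <;> omega

set_option maxHeartbeats 1000000 in
theorem action_eval_fold_eq_counts (xs : List String) (acc : Int) :
    xs.foldl (fun counter a =>
        if ["A"].contains a then counter + 2
        else if ["b", "r"].contains a then counter + 1
        else if ["B"].contains a then counter + 0
        else if ["k", "c"].contains a then counter - 1
        else if ["f", "K", "Q"].contains a then counter - 2
        else counter) acc
      = acc + 2 * (xs.count "A" : Int) + (xs.count "b" : Int) + (xs.count "r" : Int)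
          - (xs.count "k" : Int) - (xs.count "c" : Int)
          - 2 * ((xs.count "f" : Int) + (xs.count "K" : Int) + (xs.count "Q" : Int)) := by
  induction xs generalizing acc with
  | nil => simp
  | cons x xs ih =>
    simp only [List.foldl_cons]
    rw [action_eval_step, ih]
    simp only [List.count_cons, beq_iff_eq]
    unfold pvWeight
    push_cast
    ring

-- ===== VERDICT (by name: the statement is the Claim_ definition above) =====
theorem action_eval_spec : Claim_equal_action_eval := by
  unfold Claim_equal_action_eval
  intro action_list _
  unfold Spec_action_eval action_eval action_eval_alt
  cases action_list with
  | none => rfl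
  | some xs =>
    simp only
    split
    · rfl
    · simp only [PySem.Dict.getD_counter, action_eval_fold_eq_counts]
      ring_nf
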